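-- pv_equiv track=rewrite | github.com/ciphernet01/sentinelstack | AI 30 Days/cors_analyzer_pro.py | extract_subdomains
-- ===== SOURCE A (Python) =====
-- def extract_subdomains(domain):
--     """Extract subdomains from a domain"""
--     if not domain:
--         return []
--
--     parts = domain.split('.')
--     if len(parts) < 2:
--         return []
--
--     subdomains = []
--     for i in range(len(parts) - 1):
--         subdomains.append('.'.join(parts[i:]))
--
--     return subdomains
-- ===== SOURCE B (Python) =====
-- def extract_subdomains(domain):
--     """Extract subdomains from a domain"""
--     if not domain:
--         return []
--
--     parts = domain.split('.')
--     if len(parts) < 2: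
--         return []
--
--     def go(ps):
--         # returns ('.'.join(ps), list of dot-suffixes of ps longer than one label, longest first)
--         if len(ps) == 1:
--             return ps[0], []
--         tail, suf = go(ps[1:])
--         whole = ps[0] + '.' + tail
--         return whole, [whole] + suf
--
--     return go(parts)[1]
-- ===== Notes on version B (the rewrite author's own statement) =====
-- stated objective: alternative
-- what changed: Replaces the index loop that joins an independent slice parts[i:] for every i with a single structural recursion over the label list that builds each suffix from the already-joined tail and collects them longest-first.
import Mathlib
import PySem

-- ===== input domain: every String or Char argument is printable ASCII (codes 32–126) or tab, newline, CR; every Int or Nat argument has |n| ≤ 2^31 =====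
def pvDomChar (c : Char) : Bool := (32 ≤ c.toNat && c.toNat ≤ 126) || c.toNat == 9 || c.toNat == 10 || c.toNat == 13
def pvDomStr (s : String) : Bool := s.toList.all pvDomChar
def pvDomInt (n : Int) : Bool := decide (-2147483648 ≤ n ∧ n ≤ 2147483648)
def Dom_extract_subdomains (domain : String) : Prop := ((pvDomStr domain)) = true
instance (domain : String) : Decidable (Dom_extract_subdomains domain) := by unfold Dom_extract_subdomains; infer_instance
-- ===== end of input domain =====

-- B replaces A's index loop over independent slice joins by one structural recursion
-- that extends the already-joined tail; same results, alternative decomposition.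

-- ===== PORT A =====
def extract_subdomains (domain : String) : List String :=
  if domain = "" then []
  else
    -- domain.split('.'): sep "." ≠ "" so split? is always `some`
    let parts := (PySem.Str.split? domain ".").getD []
    if parts.length < 2 then []
    else
      (PySem.List.pyRange 0 ((parts.length : Int) - 1) 1).foldl
        (fun subdomains i =>
          subdomains ++ [PySem.Str.join "." (PySem.List.slice parts (some i) none)]) []

-- ===== PORT B =====
-- go ps = ('.'.join(ps), the suffixes of two or more labels, longest first);
-- the [] case is unreachable (go is only called on nonempty lists), dummy for totality.
def goB : List String → String × List String
  | [] => ("", [])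
  | [p] => (p, [])
  | p :: q :: rest =>
    let (tail, suf) := goB (q :: rest)
    let whole := p ++ "." ++ tail
    (whole, whole :: suf)

def extract_subdomains_alt (domain : String) : List String :=
  if domain = "" then []
  else
    let parts := (PySem.Str.split? domain ".").getD []
    if parts.length < 2 then []
    else (goB parts).2

-- ===== PRECONDITION & SPEC =====
def Spec_extract_subdomains (domain : String) (out : List String) : Prop := out = extract_subdomains_alt domain
instance (domain : String) (out : List String) : Decidable (Spec_extract_subdomains domain out) := by unfold Spec_extract_subdomains; infer_instance

-- ===== CLAIM (what is proved, stated in full; the proofs are below) =====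
def Claim_equal_extract_subdomains : Prop := ∀ (domain : String), Dom_extract_subdomains domain → Spec_extract_subdomains domain (extract_subdomains domain)

-- ===== LEMMAS AND PROOFS =====

-- A's result over an explicit label list: the joins of the drops, longest first.
def suffixesOf (ps : List String) : List String :=
  (List.range (ps.length - 1)).map (fun k => PySem.Str.join "." (ps.drop k))

theorem join_cons_cons_str (p q : String) (rs : List String) :
    PySem.Str.join "." (p :: q :: rs) = p ++ "." ++ PySem.Str.join "." (q :: rs) := by
  apply String.toList_injective
  simp [PySem.Str.toList_join, PySem.Chars.join_cons_cons]

theorem goB_fst (ps : List String) (h : ps ≠ []) : (goB ps).1 = PySem.Str.join "." ps := by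
  induction ps with
  | nil => exact absurd rfl h
  | cons p rest ih =>
    cases rest with
    | nil =>
      apply String.toList_injective
      simp [goB, PySem.Str.toList_join, PySem.Chars.join_singleton]
    | cons q rs =>
      have := ih (by simp)
      simp only [goB] at *
      rw [this, join_cons_cons_str]

theorem suffixesOf_cons_cons (p q : String) (rs : List String) :
    suffixesOf (p :: q :: rs)
      = (p ++ "." ++ PySem.Str.join "." (q :: rs)) :: suffixesOf (q :: rs) := by
  unfold suffixesOf
  simp only [List.length_cons, Nat.add_sub_cancel, List.range_succ_eq_map,
    List.map_cons, List.map_map, List.drop_zero]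
  refine congrArg₂ List.cons (join_cons_cons_str p q rs) ?_
  apply List.map_congr_left
  intro k _
  simp [Function.comp]

theorem goB_snd (ps : List String) (h : ps ≠ []) : (goB ps).2 = suffixesOf ps := by
  induction ps with
  | nil => exact absurd rfl h
  | cons p rest ih =>
    cases rest with
    | nil => simp [goB, suffixesOf]
    | cons q rs =>
      have h2 := ih (by simp)
      have h1 := goB_fst (q :: rs) (by simp)
      simp only [goB] at *
      rw [h2, h1, suffixesOf_cons_cons]

theorem A_eq_suffixes (ps : List String) :
    (PySem.List.pyRange 0 ((ps.length : Int) - 1) 1).foldl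
      (fun subdomains i =>
        subdomains ++ [PySem.Str.join "." (PySem.List.slice ps (some i) none)]) []
    = suffixesOf ps := by
  rw [PySem.List.foldl_append_singleton_eq_map, PySem.List.pyRange_one]
  have hn : (((ps.length : Int) - 1) - 0).toNat = ps.length - 1 := by omega
  rw [hn, List.map_map]
  apply List.map_congr_left
  intro k _
  simp [Function.comp, PySem.List.slice_from_natCast]

-- ===== VERDICT (by name: the statement is the Claim_ definition above) =====
theorem extract_subdomains_spec : Claim_equal_extract_subdomains := by
  intro domain _
  unfold Spec_extract_subdomains extract_subdomains extract_subdomains_alt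
  simp only []
  split_ifs with h1 h2
  · rfl
  · rfl
  · rw [A_eq_suffixes, goB_snd]
    intro hnil
    simp [hnil] at h2
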